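-- pv_equiv track=rewrite | github.com/pieteromt/aoc | 2015/day01/day1b.py | process
-- ===== SOURCE A (Python) =====
-- def process(data):
--     floor = 0  # starting position
--     pos = 0
--     for line in data:
--         for c in line:
--             pos += 1
--             if c == '(':
--                 floor += 1
--             elif c == ')':
--                 floor -= 1
--             if floor == -1:  # basement reached?
--                 return pos
--     return -1  # not found
-- ===== SOURCE B (Python) =====
-- def process(data):
--     s = "".join(data)
--     prefix = [0]
--     for c in s:
--         prefix.append(prefix[-1] + (1 if c == '(' else -1 if c == ')' else 0))
--     try:
--         return prefix.index(-1)
--     except ValueError: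
--         return -1
-- ===== Notes on version B (the rewrite author's own statement) =====
-- stated objective: alternative
-- what changed: Instead of one stateful scan with an early return inside nested loops, B joins the lines, builds the full running-floor prefix list, and returns the first index of -1 in it (list.index), -1 if absent.
import Mathlib
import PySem

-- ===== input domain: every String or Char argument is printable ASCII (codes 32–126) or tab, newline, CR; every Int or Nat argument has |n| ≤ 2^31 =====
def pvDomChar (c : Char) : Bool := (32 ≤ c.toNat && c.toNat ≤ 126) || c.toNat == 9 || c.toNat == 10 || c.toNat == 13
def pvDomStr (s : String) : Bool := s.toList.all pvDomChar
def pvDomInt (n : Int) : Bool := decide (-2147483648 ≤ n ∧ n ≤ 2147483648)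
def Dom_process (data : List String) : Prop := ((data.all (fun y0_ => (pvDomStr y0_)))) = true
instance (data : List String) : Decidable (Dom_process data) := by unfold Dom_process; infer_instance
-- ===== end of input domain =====

-- B joins the lines, builds the whole running-floor prefix list, then returns the first index of -1
-- in it; A is a single stateful scan with an early return. Alternative decomposition, same cost.

-- ===== PORT A =====
-- inner 'for c in line' loop; .inr pos = early return, .inl (floor, pos) = loop finished
def pvGoChars (floor pos : Int) : List Char → Sum (Int × Int) Int
  | [] => .inl (floor, pos)
  | c :: cs =>
    let pos' := pos + 1
    let floor' := if c = '(' then floor + 1 else if c = ')' then floor - 1 else floor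
    if floor' = -1 then .inr pos' else pvGoChars floor' pos' cs

-- outer 'for line in data' loop
def pvGoLines (floor pos : Int) : List String → Int
  | [] => -1
  | l :: ls =>
    match pvGoChars floor pos l.toList with
    | .inr p => p
    | .inl (f, p) => pvGoLines f p ls

def process (data : List String) : Int := pvGoLines 0 0 data

-- ===== PORT B =====
def process_alt (data : List String) : Int :=
  match PySem.List.index?
      ((PySem.Str.join "" data).toList.foldl
        (fun p c => p ++ [p.getLast! + (if c = '(' then 1 else if c = ')' then -1 else 0)])
        [(0 : Int)])
      (-1) with
  | some i => (i : Int)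
  | none => -1

-- ===== PRECONDITION & SPEC =====
def Spec_process (data : List String) (out : Int) : Prop := out = process_alt data
instance (data : List String) (out : Int) : Decidable (Spec_process data out) := by unfold Spec_process; infer_instance

-- ===== CLAIM (what is proved, stated in full; the proofs are below) =====
def Claim_equal_process : Prop := ∀ (data : List String), Dom_process data → Spec_process data (process data)

-- ===== LEMMAS AND PROOFS =====

def pvDelta (c : Char) : Int := if c = '(' then 1 else if c = ')' then -1 else 0

-- running floor values after each character, starting from floor a
def pvScan (a : Int) : List Char → List Int
  | [] => []
  | c :: cs => (a + pvDelta c) :: pvScan (a + pvDelta c) cs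

-- char-level search on the flattened stream (canonical middle form)
def pvSearch (floor pos : Int) : List Char → Int
  | [] => -1
  | c :: cs =>
    if floor + pvDelta c = -1 then pos + 1 else pvSearch (floor + pvDelta c) (pos + 1) cs

lemma pvGoChars_step (floor pos : Int) (c : Char) (cs : List Char) :
    pvGoChars floor pos (c :: cs) =
      (if floor + pvDelta c = -1 then .inr (pos + 1)
       else pvGoChars (floor + pvDelta c) (pos + 1) cs) := by
  simp only [pvGoChars, pvDelta]
  split_ifs <;> simp_all <;> ring_nf

lemma pvSearch_append (floor pos : Int) (xs ys : List Char) :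
    pvSearch floor pos (xs ++ ys) =
      (match pvGoChars floor pos xs with
       | .inl (f, p) => pvSearch f p ys
       | .inr p => p) := by
  induction xs generalizing floor pos with
  | nil => simp [pvGoChars]
  | cons c cs ih =>
    rw [List.cons_append, pvGoChars_step]
    by_cases h : floor + pvDelta c = -1
    · simp [pvSearch, h]
    · simp only [pvSearch, h, if_false]
      rw [ih]

lemma pvGoLines_eq_search (floor pos : Int) (ls : List String) :
    pvGoLines floor pos ls = pvSearch floor pos (ls.flatMap String.toList) := by
  induction ls generalizing floor pos with
  | nil => simp [pvGoLines, pvSearch]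
  | cons l ls ih =>
    rw [List.flatMap_cons, pvSearch_append]
    simp only [pvGoLines]
    cases h : pvGoChars floor pos l.toList with
    | inl fp => cases fp with | mk f p => simp [ih]
    | inr p => simp

lemma pvFoldl_prefix (cs : List Char) (init : List Int) (a : Int)
    (h : init.getLast? = some a) :
    cs.foldl (fun p c => p ++ [p.getLast! + (if c = '(' then 1 else if c = ')' then -1 else 0)]) init
      = init ++ pvScan a cs := by
  induction cs generalizing init a with
  | nil => simp [pvScan]
  | cons c cs ih =>
    have hlast : init.getLast! = a := by simp [h]
    simp only [List.foldl_cons, pvScan]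
    rw [ih (init ++ [init.getLast! + (if c = '(' then 1 else if c = ')' then -1 else 0)])
          (a + pvDelta c)
          (by simp [h, pvDelta])]
    simp [h, pvDelta]

lemma pvSearch_eq_index (a pos : Int) (cs : List Char) :
    pvSearch a pos cs =
      (match PySem.List.index? (pvScan a cs) (-1) with
       | some i => pos + 1 + (i : Int)
       | none => -1) := by
  induction cs generalizing a pos with
  | nil => simp [pvSearch, pvScan, PySem.List.index?]
  | cons c cs ih =>
    simp only [pvSearch, pvScan]
    by_cases h : a + pvDelta c = -1
    · rw [h]
      rw [PySem.List.index?_cons_self]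
      simp
    · rw [if_neg h, PySem.List.index?_cons_of_ne _ h]
      rw [ih (a + pvDelta c) (pos + 1)]
      cases hx : PySem.List.index? (pvScan (a + pvDelta c) cs) (-1) with
      | none => simp
      | some i => simp; ring

lemma pvJoinNil (ls : List (List Char)) : PySem.Chars.join [] ls = ls.flatten := by
  induction ls with
  | nil => simp [PySem.Chars.join_nil]
  | cons p rest ih =>
    cases rest with
    | nil => simp [PySem.Chars.join_singleton]
    | cons q rs =>
      rw [PySem.Chars.join_cons_cons]
      simp [ih]

lemma pvJoin_empty_toList (data : List String) :
    (PySem.Str.join "" data).toList = data.flatMap String.toList := by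
  rw [PySem.Str.toList_join]
  have he : ("" : String).toList = [] := rfl
  rw [he, pvJoinNil]
  simp [List.flatMap]

-- ===== VERDICT (by name: the statement is the Claim_ definition above) =====
theorem process_spec : Claim_equal_process := by
  intro data _
  unfold Spec_process process process_alt
  rw [pvGoLines_eq_search]
  rw [pvJoin_empty_toList]
  rw [pvFoldl_prefix _ _ 0 (by simp)]
  rw [pvSearch_eq_index]
  simp only [List.singleton_append]
  rw [PySem.List.index?_cons_of_ne _ (by norm_num)]
  cases hx : PySem.List.index? (pvScan 0 (data.flatMap String.toList)) (-1) with
  | none => simp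
  | some i => simp; ring
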